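-- pv_equiv track=rewrite | github.com/yasufumi-nakata/Pytra | src/toolchain/emit/java/emitter.py | _fqcn_to_tid_const
-- ===== SOURCE A (Python) =====
-- def _fqcn_to_tid_const(fqcn: str) -> str:
--     chars: list[str] = []
--     prev_was_lower_or_digit = False
--     for ch in fqcn.replace(".", "_"):
--         if ch.isupper() and prev_was_lower_or_digit:
--             chars.append("_")
--         if ch.isalnum() or ch == "_":
--             chars.append(ch.upper())
--         else:
--             chars.append("_")
--         prev_was_lower_or_digit = ch.islower() or ch.isdigit()
--     return "".join(chars) + "_TID"
-- ===== SOURCE B (Python) =====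
-- def _fqcn_to_tid_const(fqcn: str) -> str:
--     s = fqcn.replace(".", "_")
--     # pass 1: insert an underscore at every lower/digit -> upper boundary
--     pieces = [s[:1]]
--     for prev, ch in zip(s, s[1:]):
--         if ch.isupper() and (prev.islower() or prev.isdigit()):
--             pieces.append("_" + ch)
--         else:
--             pieces.append(ch)
--     boundaried = "".join(pieces)
--     # pass 2: uppercase word characters, replace everything else by '_'
--     mapped = "".join(c.upper() if (c.isalnum() or c == "_") else "_" for c in boundaried)
--     return mapped + "_TID"
-- ===== Notes on version B (the rewrite author's own statement) =====
-- stated objective: alternative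
-- what changed: A interleaves boundary detection and character mapping in one stateful loop with a carried prev-flag; B decomposes it into two independent passes: a zip over consecutive character pairs that inserts boundary underscores, then a stateless per-character map to uppercase/underscore.
import Mathlib
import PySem

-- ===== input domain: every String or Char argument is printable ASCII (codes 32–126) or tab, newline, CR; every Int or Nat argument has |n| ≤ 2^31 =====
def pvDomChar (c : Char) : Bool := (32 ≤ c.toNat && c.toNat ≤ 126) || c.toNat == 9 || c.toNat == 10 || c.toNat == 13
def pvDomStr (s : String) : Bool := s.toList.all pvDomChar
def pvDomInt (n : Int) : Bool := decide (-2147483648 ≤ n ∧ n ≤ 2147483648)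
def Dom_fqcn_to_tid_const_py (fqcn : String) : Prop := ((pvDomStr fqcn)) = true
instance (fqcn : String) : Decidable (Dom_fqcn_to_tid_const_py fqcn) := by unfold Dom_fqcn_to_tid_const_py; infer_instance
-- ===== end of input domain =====

-- B replaces A's single stateful loop (prev-flag carried across iterations) by two
-- independent passes: boundary underscores via a zip over consecutive pairs, then a
-- stateless per-character map; same cost, different decomposition.

-- ===== PORT A =====
-- literal port of A: one fold carrying (chars, prev_was_lower_or_digit)
def fqcn_to_tid_const_py (fqcn : String) : String :=
  let s := (PySem.Str.replace fqcn "." "_").toList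
  let step : List Char × Bool → Char → List Char × Bool := fun st ch =>
    let chars := if PySem.Chars.isupper ch && st.2 then st.1 ++ ['_'] else st.1
    let chars := if PySem.Chars.isalnum ch || ch == '_'
                 then chars ++ [PySem.Chars.upperChar ch]   -- ch.upper(): single char on the ASCII domain
                 else chars ++ ['_']
    (chars, PySem.Chars.islower ch || PySem.Chars.isdigit ch)
  String.ofList ((s.foldl step ([], false)).1 ++ "_TID".toList)

-- ===== PORT B =====
-- literal port of Source B: pass 1 (zip of consecutive pairs), pass 2 (stateless map)
def fqcn_to_tid_const_py_alt (fqcn : String) : String :=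
  let s := (PySem.Str.replace fqcn "." "_").toList
  let boundaried :=
    (List.zip s (s.drop 1)).foldl
      (fun acc pc =>
        acc ++ (if PySem.Chars.isupper pc.2 && (PySem.Chars.islower pc.1 || PySem.Chars.isdigit pc.1)
                then ['_', pc.2] else [pc.2]))
      (s.take 1)
  let mapped := boundaried.map
      (fun c => if PySem.Chars.isalnum c || c == '_' then PySem.Chars.upperChar c else '_')
  String.ofList (mapped ++ "_TID".toList)

-- ===== PRECONDITION & SPEC =====
def Spec_fqcn_to_tid_const_py (fqcn : String) (out : String) : Prop := out = fqcn_to_tid_const_py_alt fqcn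
instance (fqcn : String) (out : String) : Decidable (Spec_fqcn_to_tid_const_py fqcn out) := by unfold Spec_fqcn_to_tid_const_py; infer_instance

-- ===== CLAIM (what is proved, stated in full; the proofs are below) =====
def Claim_equal_fqcn_to_tid_const_py : Prop := ∀ (fqcn : String), Dom_fqcn_to_tid_const_py fqcn → Spec_fqcn_to_tid_const_py fqcn (fqcn_to_tid_const_py fqcn)

-- ===== LEMMAS AND PROOFS =====

-- the character map of pass 2
def pvMapF (c : Char) : Char :=
  if PySem.Chars.isalnum c || c == '_' then PySem.Chars.upperChar c else '_'

-- boundaried string continuing after previous character p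
def pvBd : Char → List Char → List Char
  | _, [] => []
  | p, c :: cs =>
      (if PySem.Chars.isupper c && (PySem.Chars.islower p || PySem.Chars.isdigit p)
       then ['_', c] else [c]) ++ pvBd c cs

-- A's fold computes acc ++ map pvMapF (pvBd p cs) when started with p's flag
theorem pvA_fold (cs : List Char) : ∀ (p : Char) (acc : List Char),
    (cs.foldl (fun (st : List Char × Bool) ch =>
      let chars := if PySem.Chars.isupper ch && st.2 then st.1 ++ ['_'] else st.1
      let chars := if PySem.Chars.isalnum ch || ch == '_'
                   then chars ++ [PySem.Chars.upperChar ch] else chars ++ ['_']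
      (chars, PySem.Chars.islower ch || PySem.Chars.isdigit ch))
      (acc, PySem.Chars.islower p || PySem.Chars.isdigit p)).1
    = acc ++ (pvBd p cs).map pvMapF := by
  induction cs with
  | nil => intro p acc; simp [pvBd]
  | cons c cs ih =>
    intro p acc
    simp only [List.foldl_cons, pvBd, List.map_append]
    rw [ih c]
    by_cases h : (PySem.Chars.isupper c && (PySem.Chars.islower p || PySem.Chars.isdigit p)) = true <;>
      by_cases h2 : (PySem.Chars.isalnum c || c == '_') = true <;>
        simp [h, h2, pvMapF, List.append_assoc] <;> decide

-- B's pass-1 fold computes its accumulator ++ pvBd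
theorem pvB_fold (cs : List Char) : ∀ (p : Char) (acc : List Char),
    ((List.zip (p :: cs) cs).foldl
      (fun acc pc =>
        acc ++ (if PySem.Chars.isupper pc.2 && (PySem.Chars.islower pc.1 || PySem.Chars.isdigit pc.1)
                then ['_', pc.2] else [pc.2])) acc)
    = acc ++ pvBd p cs := by
  induction cs with
  | nil => intro p acc; simp [pvBd]
  | cons c cs ih =>
    intro p acc
    simp only [List.zip_cons_cons, List.foldl_cons]
    rw [ih c]
    simp [pvBd]

theorem pvPorts_eq (fqcn : String) : fqcn_to_tid_const_py fqcn = fqcn_to_tid_const_py_alt fqcn := by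
  unfold fqcn_to_tid_const_py fqcn_to_tid_const_py_alt
  cases hs : (PySem.Str.replace fqcn "." "_").toList with
  | nil => simp
  | cons c cs =>
    simp only
    have hA := pvA_fold (c :: cs) '_' []
    have : (PySem.Chars.islower '_' || PySem.Chars.isdigit '_') = false := by decide
    rw [this] at hA
    rw [hA]
    have hB := pvB_fold cs c [c]
    simp only [List.drop_succ_cons, List.drop_zero, List.take_succ_cons, List.take_zero] at *
    rw [hB]
    have hbd : pvBd '_' (c :: cs) = [c] ++ pvBd c cs := by
      have : (PySem.Chars.islower '_' || PySem.Chars.isdigit '_') = false := by decide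
      simp [pvBd, this]
    rw [hbd]
    rfl

-- ===== VERDICT (by name: the statement is the Claim_ definition above) =====
theorem fqcn_to_tid_const_py_spec : Claim_equal_fqcn_to_tid_const_py := by
  intro fqcn _
  unfold Spec_fqcn_to_tid_const_py
  exact pvPorts_eq fqcn
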